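-- pv_equiv track=rewrite | github.com/ajwallace127-cmd/march-madness-tracker | march-madness-tracker/process_bracket.py | get_pick_popularity
-- ===== SOURCE A (Python) =====
-- from collections import defaultdict
--
-- def get_pick_popularity(entries: list[dict]) -> dict:
--     """Return {seed: {team: count}} for all picks."""
--     popularity = {}
--     for seed in range(1, 17):
--         counts = defaultdict(int)
--         for entry in entries:
--             team = entry["picks"].get(seed, "")
--             if team:
--                 counts[team] += 1
--         popularity[seed] = dict(sorted(counts.items(), key=lambda x: -x[1]))
--     return popularity
-- ===== SOURCE B (Python) =====
-- def get_pick_popularity(entries: list[dict]) -> dict: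
--     """Return {seed: {team: count}} for all picks."""
--     pairs = [(seed, team) for entry in entries
--              for seed, team in entry["picks"].items() if team]
--
--     def table(seed):
--         teams = [t for s, t in pairs if s == seed]
--         return dict(sorted(((t, teams.count(t)) for t in dict.fromkeys(teams)),
--                            key=lambda x: -x[1]))
--
--     return {seed: table(seed) for seed in range(1, 17)}
-- ===== Notes on version B (the rewrite author's own statement) =====
-- stated objective: alternative
-- what changed: Replaces A's 16 counting passes with defaultdict increments by flattening all picks into one (seed, team) pair list, then building each seed's table by filtering that list and counting via first-occurrence dedup plus list.count; the nested counter dict disappears.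
import Mathlib
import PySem

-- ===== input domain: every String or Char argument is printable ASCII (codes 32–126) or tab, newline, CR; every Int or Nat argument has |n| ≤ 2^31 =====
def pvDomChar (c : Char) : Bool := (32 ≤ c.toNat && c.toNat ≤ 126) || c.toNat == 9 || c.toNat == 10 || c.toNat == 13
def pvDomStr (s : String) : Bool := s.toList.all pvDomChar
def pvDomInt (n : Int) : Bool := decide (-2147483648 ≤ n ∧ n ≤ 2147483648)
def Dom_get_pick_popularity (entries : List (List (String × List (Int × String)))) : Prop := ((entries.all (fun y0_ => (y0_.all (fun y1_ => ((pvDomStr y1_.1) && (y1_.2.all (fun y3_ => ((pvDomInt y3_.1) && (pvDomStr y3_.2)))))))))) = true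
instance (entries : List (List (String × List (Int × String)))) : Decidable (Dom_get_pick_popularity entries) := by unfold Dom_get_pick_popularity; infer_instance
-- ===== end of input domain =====

-- ===== PORT A =====
-- B flattens all picks into one (seed, team) pair list and counts per seed by dedup + list.count,
-- instead of A's 16 entry passes each incrementing a defaultdict; return value only.
-- Port of A. 'dict(sorted(...))' over the counter's items (unique keys) is stored as the sorted pair list itself.
-- entry["picks"] (KeyError when absent) is ported totally via getD []; Pre_ excludes the raising inputs.
def get_pick_popularity (entries : List (List (String × List (Int × String)))) : List (Int × List (String × Int)) :=
  let pop : PySem.Dict Int (List (String × Int)) :=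
    (PySem.List.pyRange 1 17 1).foldl (fun pop seed =>
      let counts : PySem.Dict String Int :=
        entries.foldl (fun counts entry =>
          let team := (PySem.Dict.mk ((PySem.Dict.mk entry).getD "picks" [])).getD seed ""
          if team ≠ "" then counts.modify team 0 (fun v => v + 1) else counts)
          PySem.Dict.empty
      pop.insert seed (PySem.List.sorted counts.items (fun x => -x.2) false))
      PySem.Dict.empty
  pop.items

-- ===== PORT B =====
-- Port of Source B. B's 'table(seed)': filter the flat pair list, dedup the teams
-- (dict.fromkeys = PySem.List.dedup), pair each with teams.count, sort by -count.
def pvTable (pairs : List (Int × String)) (seed : Int) : List (String × Int) :=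
  let teams := (pairs.filter (fun p => p.1 == seed)).map Prod.snd
  PySem.List.sorted ((PySem.List.dedup teams).map (fun t => (t, (teams.count t : Int))))
    (fun x => -x.2) false

-- The final dict comprehension has the distinct keys 1..16 in order, so it IS this ordered pair list.
def get_pick_popularity_alt (entries : List (List (String × List (Int × String)))) : List (Int × List (String × Int)) :=
  let pairs : List (Int × String) :=
    entries.flatMap (fun entry =>
      ((PySem.Dict.mk ((PySem.Dict.mk entry).getD "picks" [])).items).filter (fun p => p.2 != ""))
  (PySem.List.pyRange 1 17 1).map (fun seed => (seed, pvTable pairs seed))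

-- ===== PRECONDITION & SPEC =====
-- Pre_ excludes exactly (a) inputs where A raises KeyError (an entry without a "picks" key) and
-- (b) association lists that do not encode a Python dict (duplicate keys inside a picks dict) -- no real
-- Python input has them, since the parameter is a dict of dicts.
def Pre_get_pick_popularity (entries : List (List (String × List (Int × String)))) : Prop :=
  ∀ entry ∈ entries, (PySem.Dict.mk entry).contains "picks" = true ∧
    (((PySem.Dict.mk entry).getD "picks" []).map Prod.fst).Nodup
instance (entries : List (List (String × List (Int × String)))) : Decidable (Pre_get_pick_popularity entries) := by
  unfold Pre_get_pick_popularity; infer_instance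
def pvWitness_get_pick_popularity : (List (List (String × List (Int × String)))) :=
  [[("picks", [(1, "Duke"), (2, "")])], [("picks", [(1, "Duke"), (17, "UNC")])]]
def Spec_get_pick_popularity (entries : List (List (String × List (Int × String)))) (out : List (Int × List (String × Int))) : Prop := out = get_pick_popularity_alt entries
instance (entries : List (List (String × List (Int × String)))) (out : List (Int × List (String × Int))) : Decidable (Spec_get_pick_popularity entries out) := by unfold Spec_get_pick_popularity; infer_instance

-- ===== CLAIM (what is proved, stated in full; the proofs are below) =====
def Claim_equal_get_pick_popularity : Prop := ∀ (entries : List (List (String × List (Int × String)))), Dom_get_pick_popularity entries → Pre_get_pick_popularity entries → Spec_get_pick_popularity entries (get_pick_popularity entries)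

-- ===== LEMMAS AND PROOFS =====

-- A's per-entry, per-seed counting step (proof-only abbreviation).
def pvStepA (s : Int) (counts : PySem.Dict String Int) (entry : List (String × List (Int × String))) : PySem.Dict String Int :=
  let team := (PySem.Dict.mk ((PySem.Dict.mk entry).getD "picks" [])).getD s ""
  if team ≠ "" then counts.modify team 0 (fun v => v + 1) else counts

-- the teams an entry contributes to seed s: [picks.get(s)] if nonempty, else []
def pvContrib (s : Int) (entry : List (String × List (Int × String))) : List String :=
  let t := (PySem.Dict.mk ((PySem.Dict.mk entry).getD "picks" [])).getD s ""
  if t ≠ "" then [t] else []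

theorem pv_foldl_flatMap {α β γ : Type} (l : List α) (g : α → List β) (f : γ → β → γ) (c : γ) :
    (l.flatMap g).foldl f c = l.foldl (fun c e => (g e).foldl f c) c := by
  induction l generalizing c with
  | nil => rfl
  | cons e rest ih => simp only [List.flatMap_cons, List.foldl_append, List.foldl_cons, ih]

-- A's fold over entries = the counter fold over the flattened team list
theorem pv_foldA_eq_counter (entries : List (List (String × List (Int × String)))) (s : Int) :
    entries.foldl (pvStepA s) PySem.Dict.empty = PySem.Dict.counter (entries.flatMap (pvContrib s)) := by
  rw [PySem.Dict.counter_eq_foldl, pv_foldl_flatMap]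
  apply PySem.List.foldl_congr_mem
  intro c e _
  unfold pvStepA pvContrib
  by_cases h : (PySem.Dict.mk ((PySem.Dict.mk e).getD "picks" [])).getD s "" ≠ ""
  · simp only [if_pos h, List.foldl_cons, List.foldl_nil]
  · simp only [if_neg h, List.foldl_nil]

-- per entry, with unique picks keys: filtering the pair list to seed s gives exactly pvContrib s
theorem pv_filter_eq_contrib (picks : List (Int × String)) (s : Int)
    (hnd : (picks.map Prod.fst).Nodup) :
    (((picks.filter (fun p => p.2 != "")).filter (fun p => p.1 == s)).map Prod.snd) =
      (let t := (PySem.Dict.mk picks).getD s ""; if t ≠ "" then [t] else []) := by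
  induction picks with
  | nil => rfl
  | cons p rest ih =>
    obtain ⟨k, t⟩ := p
    simp only [List.map_cons, List.nodup_cons] at hnd
    obtain ⟨hk, hnd'⟩ := hnd
    have hlook : (PySem.Dict.mk ((k, t) :: rest)).getD s "" =
        if k == s then t else (PySem.Dict.mk rest).getD s "" := by
      rw [PySem.Dict.getD_eq_get?_getD, PySem.Dict.get?_mk_cons, PySem.Dict.getD_eq_get?_getD]
      by_cases hks : k == s <;> simp [hks]
    by_cases hks : k = s
    · subst hks
      -- the tail carries no key k, so its filtered contribution is empty
      have htail : (rest.filter (fun p => p.2 != "")).filter (fun p => p.1 == k) = [] := by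
        rw [List.filter_eq_nil_iff]
        intro p hp hpk
        exact hk (List.mem_map.mpr ⟨p, List.mem_of_mem_filter hp, by simpa using hpk⟩)
      by_cases ht : t = ""
      · subst ht; simp [hlook, htail]
      · simp [hlook, ht, htail]
    · have hne : (k == s) = false := by simpa using hks
      by_cases ht : t = ""
      · subst ht; simp only [List.filter_cons]; simp [hlook, hne]; simpa using ih hnd'
      · simp only [List.filter_cons]; simp [hlook, ht, hne]; simpa using ih hnd'

-- the flat pair list of B, filtered to seed s, is the flatMap of per-entry contributions
theorem pv_teams_eq_flatMap (entries : List (List (String × List (Int × String)))) (s : Int)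
    (hpre : Pre_get_pick_popularity entries) :
    ((entries.flatMap (fun entry =>
        ((PySem.Dict.mk ((PySem.Dict.mk entry).getD "picks" [])).items).filter
          (fun p => p.2 != ""))).filter (fun p => p.1 == s)).map Prod.snd =
      entries.flatMap (pvContrib s) := by
  induction entries with
  | nil => rfl
  | cons e rest ih =>
    have hpe := (hpre e List.mem_cons_self).2
    have hpr : Pre_get_pick_popularity rest := fun x hx => hpre x (List.mem_cons_of_mem e hx)
    simp only [List.flatMap_cons, List.filter_append, List.map_append, ih hpr]
    congr 1
    exact pv_filter_eq_contrib _ s hpe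

-- ===== VERDICT (by name: the statement is the Claim_ definition above) =====
theorem get_pick_popularity_spec : Claim_equal_get_pick_popularity := by
  intro entries _ hpre
  show ((PySem.List.pyRange 1 17 1).foldl (fun pop seed =>
      pop.insert seed (PySem.List.sorted (entries.foldl (pvStepA seed) PySem.Dict.empty).items (fun x => -x.2) false))
      (PySem.Dict.empty : PySem.Dict Int (List (String × Int)))).items =
    (PySem.List.pyRange 1 17 1).map (fun seed => (seed, pvTable (entries.flatMap (fun entry =>
      ((PySem.Dict.mk ((PySem.Dict.mk entry).getD "picks" [])).items).filter (fun p => p.2 != ""))) seed))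
  rw [PySem.Dict.items_foldl_insert_fresh (PySem.List.pyRange 1 17 1) (fun a => a)
      (fun seed => PySem.List.sorted (entries.foldl (pvStepA seed) PySem.Dict.empty).items (fun x => -x.2) false)
      PySem.Dict.empty (fun a _ => PySem.Dict.contains_empty a)
      (by simpa using PySem.List.nodup_pyRange_one 1 17)]
  show (PySem.List.pyRange 1 17 1).map (fun s =>
      (s, PySem.List.sorted (entries.foldl (pvStepA s) PySem.Dict.empty).items (fun x => -x.2) false)) = _
  apply List.map_congr_left
  intro s _
  unfold pvTable
  rw [pv_teams_eq_flatMap entries s hpre, pv_foldA_eq_counter entries s,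
    PySem.Dict.items_counter]
  simp [PySem.List.dedup_eq_ofList]
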